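-- pv_equiv track=rewrite | github.com/tokar821/hyeaero.ai-research-rag-bot | services/image_answer_alignment_engine.py | _dominant_model_for_row
-- ===== SOURCE A (Python) =====
-- from typing import Any, Dict, List, Optional
--
-- def _dominant_model_for_row(blob: str, candidates: List[str]) -> Optional[str]:
--     best = None
--     best_len = 0
--     for c in candidates:
--         cl = c.lower()
--         if cl in blob and len(cl) > best_len:
--             best_len = len(cl)
--             best = c
--     return best
-- ===== SOURCE B (Python) =====
-- from typing import List, Optional
--
-- def _dominant_model_for_row(blob: str, candidates: List[str]) -> Optional[str]:
--     for c in sorted(candidates, key=lambda s: len(s.lower()), reverse=True):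
--         cl = c.lower()
--         if len(cl) > 0 and cl in blob:
--             return c
--     return None
-- ===== Notes on version B (the rewrite author's own statement) =====
-- stated objective: faster
-- what changed: Replaces the single-pass scan-and-track-max with a stable descending-length sort followed by a scan that returns at the first matching candidate (sort stability keeps the tie-breaking), so most candidates never undergo the costly substring test.
import Mathlib
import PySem

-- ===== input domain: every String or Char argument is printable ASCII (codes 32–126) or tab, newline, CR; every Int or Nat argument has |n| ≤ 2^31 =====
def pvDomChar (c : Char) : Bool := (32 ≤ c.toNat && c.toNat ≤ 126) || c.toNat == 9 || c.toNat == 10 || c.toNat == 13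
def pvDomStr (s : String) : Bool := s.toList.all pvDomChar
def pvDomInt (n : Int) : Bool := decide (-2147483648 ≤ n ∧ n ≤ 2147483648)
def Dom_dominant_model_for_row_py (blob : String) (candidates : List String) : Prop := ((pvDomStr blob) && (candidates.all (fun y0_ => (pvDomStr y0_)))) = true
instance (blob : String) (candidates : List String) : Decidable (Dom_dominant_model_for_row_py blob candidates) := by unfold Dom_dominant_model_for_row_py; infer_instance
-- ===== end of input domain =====

-- B replaces A's scan-and-track-max single pass with a stable sort by descending lowercased
-- length followed by a first-match scan (the scan can return early, so it is measurably faster).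

-- ===== PORT A =====
-- literal transliteration of A: fold over candidates keeping (best, best_len)
def dominant_model_for_row_py (blob : String) (candidates : List String) : Option String :=
  (candidates.foldl
    (fun (st : Option String × Int) c =>
      let cl := PySem.Str.lower c
      if PySem.Str.isIn cl blob && decide (st.2 < PySem.Str.len cl) then
        (some c, PySem.Str.len cl)
      else st)
    ((none : Option String), (0 : Int))).1

-- ===== PORT B =====
-- literal transliteration of B: stable sort by descending len(lower), first match wins
def dominant_model_for_row_py_alt (blob : String) (candidates : List String) : Option String :=
  (PySem.List.sorted candidates (fun s => PySem.Str.len (PySem.Str.lower s)) true).find?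
    (fun c =>
      let cl := PySem.Str.lower c
      decide (0 < PySem.Str.len cl) && PySem.Str.isIn cl blob)

-- ===== PRECONDITION & SPEC =====
def Spec_dominant_model_for_row_py (blob : String) (candidates : List String) (out : Option String) : Prop := out = dominant_model_for_row_py_alt blob candidates
instance (blob : String) (candidates : List String) (out : Option String) : Decidable (Spec_dominant_model_for_row_py blob candidates out) := by unfold Spec_dominant_model_for_row_py; infer_instance

-- ===== CLAIM (what is proved, stated in full; the proofs are below) =====
def Claim_equal_dominant_model_for_row_py : Prop := ∀ (blob : String) (candidates : List String), Dom_dominant_model_for_row_py blob candidates → Spec_dominant_model_for_row_py blob candidates (dominant_model_for_row_py blob candidates)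

-- ===== LEMMAS AND PROOFS =====

-- the A-side state read off from B's find? result
def pvStateOf (key : String → Int) (o : Option String) : Option String × Int :=
  match o with
  | none => (none, 0)
  | some m => (some m, key m)

-- how find? behaves under one stable descending insertion
theorem pv_find?_insertBy (key : String → Int) (p : String → Bool)
    (L : List String) (hL : L.Pairwise (fun a b => key b ≤ key a)) (x : String) :
    (PySem.List.insertBy (fun a b => decide (key b < key a)) x L).find? p =
      match L.find? p with
      | none => if p x then some x else none
      | some m => if p x && decide (key m < key x) then some x else some m := by
  induction L with
  | nil => simp [PySem.List.insertBy]
  | cons y ys ih =>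
    rw [List.pairwise_cons] at hL
    by_cases hb : key y < key x
    · simp only [PySem.List.insertBy, hb, decide_true, if_pos]
      cases hfind : (y :: ys).find? p with
      | none =>
        rw [List.find?_cons] at hfind
        by_cases hpx : p x <;> by_cases hpy : p y <;> simp_all
      | some m =>
        have hm : m ∈ y :: ys := List.mem_of_find?_eq_some hfind
        have hkm : key m < key x := by
          rcases List.mem_cons.mp hm with h | h
          · simpa [h] using hb
          · exact lt_of_le_of_lt (hL.1 m h) hb
        by_cases hpx : p x <;> simp [hpx, hkm, hfind]
    · simp only [PySem.List.insertBy, hb, decide_false, Bool.false_eq_true, if_neg,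
        not_false_eq_true]
      by_cases hpy : p y
      · simp [hpy, hb]
      · simp only [List.find?_cons, hpy]
        exact ih hL.2

-- the loop invariant: A's fold state is determined by B's find? on the sorted prefix
theorem pv_invariant (blob : String) (cs : List String) :
    cs.foldl
      (fun (st : Option String × Int) c =>
        let cl := PySem.Str.lower c
        if PySem.Str.isIn cl blob && decide (st.2 < PySem.Str.len cl) then
          (some c, PySem.Str.len cl)
        else st)
      ((none : Option String), (0 : Int)) =
    pvStateOf (fun s => PySem.Str.len (PySem.Str.lower s))
      ((PySem.List.sorted cs (fun s => PySem.Str.len (PySem.Str.lower s)) true).find?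
        (fun c =>
          let cl := PySem.Str.lower c
          decide (0 < PySem.Str.len cl) && PySem.Str.isIn cl blob)) := by
  set key : String → Int := fun s => PySem.Str.len (PySem.Str.lower s) with hkey
  set p : String → Bool := fun c => decide (0 < key c) && PySem.Str.isIn (PySem.Str.lower c) blob with hp
  induction cs using List.reverseRecOn with
  | nil => simp [pvStateOf, PySem.List.sorted]
  | append_singleton xs x ih =>
    rw [List.foldl_append, ih, PySem.List.sorted_rev_eq_foldl_insertBy (xs ++ [x]) key,
      List.foldl_append, List.foldl_cons, List.foldl_nil, List.foldl_cons, List.foldl_nil,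
      pv_find?_insertBy key p _
        (PySem.List.sorted_rev_eq_foldl_insertBy xs key ▸
          PySem.List.sorted_pairwise_rev xs key) x,
      ← PySem.List.sorted_rev_eq_foldl_insertBy]
    cases hfind : (PySem.List.sorted xs key true).find? p with
    | none =>
      simp only [pvStateOf]
      by_cases hin : PySem.Chars.isIn (PySem.Chars.lower x.toList) blob.toList <;>
        by_cases hlen : 0 < (PySem.Chars.lower x.toList).length <;>
          simp [hp, key, hin, hlen]
    | some m =>
      simp only [pvStateOf]
      by_cases hlt : (PySem.Chars.lower m.toList).length < (PySem.Chars.lower x.toList).length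
      · have hxpos : 0 < (PySem.Chars.lower x.toList).length :=
          Nat.lt_of_le_of_lt (Nat.zero_le _) hlt
        by_cases hin : PySem.Chars.isIn (PySem.Chars.lower x.toList) blob.toList <;>
          simp [hp, key, hin, hlt, hxpos]
      · by_cases hin : PySem.Chars.isIn (PySem.Chars.lower x.toList) blob.toList <;>
          simp [hp, key, hin, hlt]

-- ===== VERDICT (by name: the statement is the Claim_ definition above) =====
theorem dominant_model_for_row_py_spec : Claim_equal_dominant_model_for_row_py := by
  intro blob candidates _
  unfold Spec_dominant_model_for_row_py dominant_model_for_row_py dominant_model_for_row_py_alt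
  rw [pv_invariant]
  cases (PySem.List.sorted candidates (fun s => PySem.Str.len (PySem.Str.lower s)) true).find?
      (fun c =>
        let cl := PySem.Str.lower c
        decide (0 < PySem.Str.len cl) && PySem.Str.isIn cl blob) <;>
    simp [pvStateOf]
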